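-- pv_equiv track=rewrite | github.com/weicai-design/ai-stack-super-enhanced | 📚 Enhanced RAG & Knowledge Graph/services/self_learning_system.py | _calculate_experience_statistics
-- ===== SOURCE A (Python) =====
-- from typing import List, Dict, Any, Optional
--
-- def _calculate_experience_statistics(experiences: List[Dict]) -> Dict[str, int]:
--     """计算经验统计信息"""
--     stats = {
--         'total_types': len(set(exp['issue_type'] for exp in experiences)),
--         'high_priority': sum(1 for exp in experiences if exp.get('priority_level') == 'high'),
--         'medium_priority': sum(1 for exp in experiences if exp.get('priority_level') == 'medium'),
--         'low_priority': sum(1 for exp in experiences if exp.get('priority_level') == 'low'),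
--         'critical_severity': sum(1 for exp in experiences if exp.get('severity') == 'critical')
--     }
--     return stats
-- ===== SOURCE B (Python) =====
-- def _calculate_experience_statistics(experiences):
--     """Single pass: one traversal maintaining a type set and running tallies."""
--     types = set()
--     high = medium = low = critical = 0
--     for exp in experiences:
--         types.add(exp['issue_type'])
--         p = exp.get('priority_level')
--         if p == 'high':
--             high += 1
--         if p == 'medium':
--             medium += 1
--         if p == 'low':
--             low += 1
--         if exp.get('severity') == 'critical':
--             critical += 1
--     return {
--         'total_types': len(types),
--         'high_priority': high,
--         'medium_priority': medium,
--         'low_priority': low,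
--         'critical_severity': critical,
--     }
-- ===== Notes on version B (the rewrite author's own statement) =====
-- stated objective: faster
-- what changed: Replaces five independent comprehension scans (a set-comprehension plus four filtered sums) by one loop over the experiences that maintains a type set and four integer tallies.
import Mathlib
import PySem

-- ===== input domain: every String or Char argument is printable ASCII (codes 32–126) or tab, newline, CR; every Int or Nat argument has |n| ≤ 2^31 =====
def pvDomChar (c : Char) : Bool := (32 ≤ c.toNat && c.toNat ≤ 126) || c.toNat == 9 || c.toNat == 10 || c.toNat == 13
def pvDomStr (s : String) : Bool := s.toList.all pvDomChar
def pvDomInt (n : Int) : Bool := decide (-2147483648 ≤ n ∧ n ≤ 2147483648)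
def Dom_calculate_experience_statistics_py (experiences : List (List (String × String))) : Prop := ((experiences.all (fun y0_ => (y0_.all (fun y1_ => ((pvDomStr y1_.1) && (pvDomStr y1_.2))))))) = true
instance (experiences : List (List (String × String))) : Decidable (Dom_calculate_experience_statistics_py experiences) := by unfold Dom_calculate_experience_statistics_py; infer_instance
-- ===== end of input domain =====

-- B replaces A's five independent comprehension scans by one pass keeping a type set and four tallies (constant-factor speedup).


-- ===== PORT A =====
-- exp['issue_type'] raises KeyError when absent; Pre_ excludes that, so the
-- total `.getD ""` default is never reached inside Pre_.
def calculate_experience_statistics_py (experiences : List (List (String × String))) : List (String × Int) :=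
  [("total_types", ((PySem.Set.ofList (experiences.map (fun e => ((PySem.Dict.mk e).get? "issue_type").getD ""))).length : Int)),
   ("high_priority", ((experiences.countP (fun e => (PySem.Dict.mk e).get? "priority_level" == some "high")) : Int)),
   ("medium_priority", ((experiences.countP (fun e => (PySem.Dict.mk e).get? "priority_level" == some "medium")) : Int)),
   ("low_priority", ((experiences.countP (fun e => (PySem.Dict.mk e).get? "priority_level" == some "low")) : Int)),
   ("critical_severity", ((experiences.countP (fun e => (PySem.Dict.mk e).get? "severity" == some "critical")) : Int))]

-- ===== PORT B =====
def pvStepB (st : PySem.Set String × Int × Int × Int × Int) (e : List (String × String)) :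
    PySem.Set String × Int × Int × Int × Int :=
  let d := PySem.Dict.mk e
  let ts := PySem.Set.add st.1 ((d.get? "issue_type").getD "")
  let p := d.get? "priority_level"
  (ts,
   st.2.1 + (if p == some "high" then 1 else 0),
   st.2.2.1 + (if p == some "medium" then 1 else 0),
   st.2.2.2.1 + (if p == some "low" then 1 else 0),
   st.2.2.2.2 + (if d.get? "severity" == some "critical" then 1 else 0))

def calculate_experience_statistics_py_alt (experiences : List (List (String × String))) : List (String × Int) :=
  let st := experiences.foldl pvStepB (PySem.Set.empty, 0, 0, 0, 0)
  [("total_types", (st.1.length : Int)),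
   ("high_priority", st.2.1),
   ("medium_priority", st.2.2.1),
   ("low_priority", st.2.2.2.1),
   ("critical_severity", st.2.2.2.2)]

-- ===== PRECONDITION & SPEC =====
-- Pre_ excludes exactly the inputs where some experience lacks the key
-- 'issue_type': there Python A raises KeyError (and B raises too).
def Pre_calculate_experience_statistics_py (experiences : List (List (String × String))) : Prop :=
  (experiences.all (fun e => (PySem.Dict.mk e).contains "issue_type")) = true
instance (experiences : List (List (String × String))) : Decidable (Pre_calculate_experience_statistics_py experiences) := by unfold Pre_calculate_experience_statistics_py; infer_instance

def pvWitness_calculate_experience_statistics_py : (List (List (String × String))) :=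
  [[("issue_type", "bug"), ("priority_level", "high")], [("issue_type", "bug"), ("severity", "critical")]]

def Spec_calculate_experience_statistics_py (experiences : List (List (String × String))) (out : List (String × Int)) : Prop := out = calculate_experience_statistics_py_alt experiences
instance (experiences : List (List (String × String))) (out : List (String × Int)) : Decidable (Spec_calculate_experience_statistics_py experiences out) := by unfold Spec_calculate_experience_statistics_py; infer_instance

-- ===== CLAIM (what is proved, stated in full; the proofs are below) =====
def Claim_equal_calculate_experience_statistics_py : Prop := ∀ (experiences : List (List (String × String))), Dom_calculate_experience_statistics_py experiences → Pre_calculate_experience_statistics_py experiences → Spec_calculate_experience_statistics_py experiences (calculate_experience_statistics_py experiences)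

-- ===== LEMMAS AND PROOFS =====
-- Invariant of B's single pass: the folded state is the type set so far plus
-- the four running counts.
theorem pvFoldB_eq (l : List (List (String × String))) :
    ∀ (s : PySem.Set String) (h m lo c : Int),
    l.foldl pvStepB (s, h, m, lo, c) =
      (l.foldl (fun s e => PySem.Set.add s (((PySem.Dict.mk e).get? "issue_type").getD "")) s,
       h + (l.countP (fun e => (PySem.Dict.mk e).get? "priority_level" == some "high") : Int),
       m + (l.countP (fun e => (PySem.Dict.mk e).get? "priority_level" == some "medium") : Int),
       lo + (l.countP (fun e => (PySem.Dict.mk e).get? "priority_level" == some "low") : Int),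
       c + (l.countP (fun e => (PySem.Dict.mk e).get? "severity" == some "critical") : Int)) := by
  induction l with
  | nil => intro s h m lo c; simp
  | cons x xs ih =>
    intro s h m lo c
    simp only [List.foldl_cons, List.countP_cons, pvStepB]
    rw [ih]
    refine Prod.ext rfl (Prod.ext ?_ (Prod.ext ?_ (Prod.ext ?_ ?_))) <;>
      simp only [] <;> split_ifs <;> push_cast <;> ring

theorem calculate_experience_statistics_py_spec : Claim_equal_calculate_experience_statistics_py := by
  intro experiences _ _
  unfold Spec_calculate_experience_statistics_py
  unfold calculate_experience_statistics_py calculate_experience_statistics_py_alt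
  rw [pvFoldB_eq]
  simp [PySem.Set.ofList_eq_foldl, List.foldl_map, PySem.Set.empty]
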